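-- pv_equiv track=rewrite | github.com/mateuszwroobel/DSA | egzaminy/egz3/egz3A/egz3A.py | treecut
-- ===== SOURCE A (Python) =====
-- def treecut(H, k):
--     #funkcja kompresujaca punkty
--     def compress(A):
--         mapped = { v : index for index,v in enumerate(sorted(A)) }
--         #klucz - oryginalny punkt
--         #index - skompresowany punkt
--         return mapped
--
--     left = lambda i: i*2 + 1
--     right = lambda i: i*2 + 2
--     parent = lambda i: (i-1)//2
--
--     class SegmentTree:
--         def __init__(self,n):
--             self.leaves = 1
--
--             #Liscie to elementy naszej oryginalnej tablicy
--             #Wezly wewnetrze to sumy przedzialow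
--             while self.leaves < n:
--                 self.leaves*=2
--
--             #Drzewo binarne ma 2*(liczba lisci) - 1 wezlow
--             #Liscie zaczynaja sie od indeksu (leaves - 1)
--             self.heap = [0] * (2*self.leaves - 1)
--
--         def update(self,i):
--             #Aktualizacja wartosci
--             #Parametry:
--             #i - oryginalny indeks w  tablicy
--
--             #Szukam liscia o odpowiedniku "i"
--             q = i + self.leaves - 1
--
--             #Wedrujemy od liscia do korzenia
--             while q > 0:
--                 self.heap[q] += 1
--                 q = parent(q)
--             self.heap[0] += 1
--
--         def _sum(self,node, n_low, n_high, i, j):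
--             # Suma w przedziale i-j:
--             # node odpowiada za sume przedziale od n_low - n_high
--             # czyli de-facto ile jest liczb z przedzialu od n_low - n_high
--
--             #Case 1 - Przedzialy nie nachodza na siebie
--             if n_low > j or n_high  < i:
--                 return 0
--             #Case 2 - Przedzial za ktory odpowiedzialny jest node zawiera sie w calosci
--             if n_low >= i and n_high <= j:
--                 return self.heap[node]
--
--             #Case 3 - Przedzialy sie przecinaja
--             mid = (n_low+n_high)//2
--             sum_left = self._sum(left(node),n_low,mid,i,j)
--             sum_right = self._sum(right(node),mid+1,n_high,i,j)
--             return sum_left + sum_right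
--
--         def sum(self,i,j):
--             return self._sum(0, 0, self.leaves-1, i, j)
--
--
--     mapped = compress(H)
--     n = len(H)
--     st = SegmentTree(n)
--     impossible = 0
--     for i in range(n):
--         tree = mapped[H[i]]
--         impossible += st.sum(tree+1,n)
--         if impossible > k:
--             return i
--         st.update(tree)
--     return n
-- ===== SOURCE B (Python) =====
-- def treecut(H, k):
--     total = 0
--     for i, x in enumerate(H):
--         total += sum(1 for y in H[:i] if y > x)
--         if total > k:
--             return i
--     return len(H)
-- ===== Notes on version B (the rewrite author's own statement) =====
-- stated objective: simpler
-- what changed: Replaces the coordinate compression plus hand-built segment tree with a direct running count of pairs j<i with H[j]>H[i] (the same inversion total), keeping the identical early-exit threshold test.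
import Mathlib
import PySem

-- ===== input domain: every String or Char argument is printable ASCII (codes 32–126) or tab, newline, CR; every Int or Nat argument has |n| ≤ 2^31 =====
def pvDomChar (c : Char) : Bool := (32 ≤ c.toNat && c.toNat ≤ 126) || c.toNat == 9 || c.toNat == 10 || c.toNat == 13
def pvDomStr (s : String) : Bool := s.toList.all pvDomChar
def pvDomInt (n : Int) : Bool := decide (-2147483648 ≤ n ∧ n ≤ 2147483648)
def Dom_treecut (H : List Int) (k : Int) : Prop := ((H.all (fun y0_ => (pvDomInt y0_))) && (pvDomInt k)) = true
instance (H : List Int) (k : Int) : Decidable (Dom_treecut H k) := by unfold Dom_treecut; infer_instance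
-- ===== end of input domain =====

-- B replaces compression + a hand-built segment tree by a direct two-loop running
-- count of the same inversion total (simpler, not faster); return values proved equal.

-- ===== PORT A =====

-- compress(A): {v: index for index, v in enumerate(sorted(A))}
def pvCompress (A : List Int) : PySem.Dict Int Int :=
  (PySem.List.enumerate (PySem.List.sorted A (fun v => v) false) 0).foldl
    (fun d p => d.insert p.2 p.1) PySem.Dict.empty

-- SegmentTree.__init__: while self.leaves < n: self.leaves *= 2   (leaves starts at 1;
-- the 0 < l test only makes the recursion terminate, it is always true at the call)
def pvLeaves (n l : Nat) : Nat :=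
  if _h : 0 < l ∧ l < n then pvLeaves n (l * 2) else l
termination_by n - l
decreasing_by omega

-- update: q = i + leaves - 1; while q > 0: heap[q] += 1; q = (q-1)//2
def pvUpdLoop (heap : List Int) (q : Nat) : List Int :=
  if _h : 0 < q then pvUpdLoop (heap.set q (heap.getD q 0 + 1)) ((q - 1) / 2) else heap
termination_by q
decreasing_by omega

-- update's tail: self.heap[0] += 1
def pvUpdate (heap : List Int) (leaves i : Nat) : List Int :=
  let h' := pvUpdLoop heap (i + leaves - 1)
  h'.set 0 (h'.getD 0 0 + 1)

-- _sum(node, n_low, n_high, i, j); all arguments are nonnegative at every call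
def pvSum (heap : List Int) (node n_low n_high i j : Nat) : Int :=
  if n_low > j ∨ n_high < i then 0
  else if n_low ≥ i ∧ n_high ≤ j then heap.getD node 0
  else
    pvSum heap (2 * node + 1) n_low ((n_low + n_high) / 2) i j +
    pvSum heap (2 * node + 2) ((n_low + n_high) / 2 + 1) n_high i j
termination_by n_high - n_low
decreasing_by all_goals omega

-- the main for-loop of treecut
def pvLoopA (H : List Int) (k : Int) (mapped : PySem.Dict Int Int) (leaves : Nat)
    (heap : List Int) (impossible : Int) (i : Nat) : Int :=
  if i < H.length then
    let tree := (mapped.getD (H.getD i 0) 0).toNat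
    let imp := impossible + pvSum heap 0 0 (leaves - 1) (tree + 1) H.length
    if imp > k then (i : Int)
    else pvLoopA H k mapped leaves (pvUpdate heap leaves tree) imp (i + 1)
  else (H.length : Int)
termination_by H.length - i
decreasing_by omega

def treecut (H : List Int) (k : Int) : Int :=
  let mapped := pvCompress H
  let leaves := pvLeaves H.length 1
  pvLoopA H k mapped leaves (List.replicate (2 * leaves - 1) 0) 0 0

-- ===== PORT B =====

def pvLoopB (H : List Int) (k : Int) (total : Int) (i : Nat) : Int :=
  if i < H.length then
    let x := H.getD i 0
    let total' := total + (((H.take i).filter (fun y => decide (x < y))).length : Int)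
    if total' > k then (i : Int) else pvLoopB H k total' (i + 1)
  else (H.length : Int)
termination_by H.length - i
decreasing_by omega

def treecut_alt (H : List Int) (k : Int) : Int := pvLoopB H k 0 0

-- ===== PRECONDITION & SPEC =====
def Spec_treecut (H : List Int) (k : Int) (out : Int) : Prop := out = treecut_alt H k
instance (H : List Int) (k : Int) (out : Int) : Decidable (Spec_treecut H k out) := by unfold Spec_treecut; infer_instance

-- ===== CLAIM (what is proved, stated in full; the proofs are below) =====
def Claim_equal_treecut : Prop := ∀ (H : List Int) (k : Int), Dom_treecut H k → Spec_treecut H k (treecut H k)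

-- ===== LEMMAS AND PROOFS =====

def onPath (q m : Nat) : Bool :=
  if m = q then true else if m = 0 then false else onPath q ((m - 1) / 2)
termination_by m
decreasing_by omega

theorem onPath_zero (m : Nat) : onPath 0 m = true := by
  induction m using Nat.strong_induction_on with
  | _ m ih =>
    rw [onPath]
    split
    · rfl
    · exact ih _ (by omega)

theorem onPath_iff (q m : Nat) : onPath q m = true ↔ ∃ t, (m + 1) / 2 ^ t = q + 1 := by
  induction m using Nat.strong_induction_on generalizing q with
  | _ m ih =>
    rw [onPath]
    split
    · subst m
      exact ⟨fun _ => ⟨0, by simp⟩, fun _ => rfl⟩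
    · split
      · rename_i hne h0
        subst m
        constructor
        · intro h; simp at h
        · rintro ⟨t, ht⟩
          have h1 : 1 / 2 ^ t ≤ 1 := Nat.div_le_self _ _
          simp only [Nat.zero_add] at ht
          omega
      · rename_i hne h0
        rw [ih _ (by omega)]
        constructor
        · rintro ⟨t, ht⟩
          refine ⟨t + 1, ?_⟩
          have h2 : (m - 1) / 2 + 1 = (m + 1) / 2 := by omega
          rw [pow_succ, Nat.mul_comm, ← Nat.div_div_eq_div_mul, ← h2]
          exact ht
        · rintro ⟨t, ht⟩
          match t with
          | 0 => simp at ht; omega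
          | t + 1 =>
            refine ⟨t, ?_⟩
            have h2 : (m - 1) / 2 + 1 = (m + 1) / 2 := by omega
            rw [h2, Nat.div_div_eq_div_mul, ← Nat.mul_comm, ← pow_succ]
            exact ht

theorem onPath_le {q m : Nat} (h : onPath q m = true) : q ≤ m := by
  rw [onPath_iff] at h
  obtain ⟨t, ht⟩ := h
  have := Nat.div_le_self (m + 1) (2 ^ t)
  omega

theorem anc_iff (E e node lo hi r : Nat)
    (hlo : lo + 2 ^ E = (node + 1) * 2 ^ e)
    (hhi : hi + 1 + 2 ^ E = (node + 2) * 2 ^ e)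
    (hr : r < 2 ^ E) (hhiL : hi < 2 ^ E) :
    (onPath node (r + 2 ^ E - 1) = true) ↔ (lo ≤ r ∧ r ≤ hi) := by
  have hL1 : 1 ≤ 2 ^ E := Nat.one_le_two_pow
  have he1 : 1 ≤ 2 ^ e := Nat.one_le_two_pow
  have hm : r + 2 ^ E - 1 + 1 = r + 2 ^ E := by omega
  rw [onPath_iff]
  simp only [hm]
  constructor
  · rintro ⟨t, ht⟩
    have hpos : 0 < 2 ^ t := Nat.pow_pos (by omega)
    have h1 : (node + 1) * 2 ^ t ≤ r + 2 ^ E := by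
      rw [← ht]; exact Nat.div_mul_le_self _ _
    have h2 : r + 2 ^ E < (node + 2) * 2 ^ t := by
      rw [← Nat.div_lt_iff_lt_mul hpos, ht]; omega
    rcases Nat.lt_trichotomy t e with hlt | heq | hgt
    · exfalso
      obtain ⟨d, hd⟩ : ∃ d, e = t + (d + 1) := ⟨e - t - 1, by omega⟩
      have h5 : (node + 2) * 2 ^ e = (node + 2) * 2 ^ t * 2 ^ (d + 1) := by
        rw [hd, pow_add, Nat.mul_assoc]
      have h3 : 2 ≤ 2 ^ (d + 1) := by
        have := Nat.one_lt_two_pow_iff (n := d + 1); omega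
      have h6 : (node + 2) * 2 ^ t * 2 ≤ (node + 2) * 2 ^ t * 2 ^ (d + 1) :=
        Nat.mul_le_mul_left _ h3
      omega
    · subst heq; omega
    · exfalso
      obtain ⟨d, hd⟩ : ∃ d, t = e + (d + 1) := ⟨t - e - 1, by omega⟩
      have h5 : (node + 1) * 2 ^ t = (node + 1) * 2 ^ e * 2 ^ (d + 1) := by
        rw [hd, pow_add, Nat.mul_assoc]
      have h3 : 2 ≤ 2 ^ (d + 1) := by
        have := Nat.one_lt_two_pow_iff (n := d + 1); omega
      have h6 : (node + 1) * 2 ^ e * 2 ≤ (node + 1) * 2 ^ e * 2 ^ (d + 1) :=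
        Nat.mul_le_mul_left _ h3
      omega
  · rintro ⟨hlor, hrhi⟩
    refine ⟨e, ?_⟩
    have hpos : 0 < 2 ^ e := by omega
    have h1 : (node + 1) * 2 ^ e ≤ r + 2 ^ E := by omega
    have h2 : r + 2 ^ E < (node + 2) * 2 ^ e := by omega
    exact Nat.div_eq_of_lt_le h1 (by rw [Nat.succ_mul] at *; omega)


-- getD after set
theorem getD_set (xs : List Int) (i j : Nat) (v d : Int) :
    (xs.set i v).getD j d = if i = j ∧ i < xs.length then v else xs.getD j d := by
  simp only [List.getD_eq_getElem?_getD, List.getElem?_set]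
  split_ifs <;> simp_all <;> omega

-- the climb loop does not change the length
theorem pvUpdLoop_length (q0 : Nat) : ∀ heap : List Int, (pvUpdLoop heap q0).length = heap.length := by
  induction q0 using Nat.strong_induction_on with
  | _ q0 ih =>
    intro heap
    rw [pvUpdLoop]
    split
    · rw [ih ((q0 - 1) / 2) (by omega)]; simp
    · rfl

-- effect of the update climb loop on one cell
theorem pvUpdLoop_getD (q0 : Nat) : ∀ (heap : List Int) (q : Nat), q0 < heap.length → q < heap.length →
    (pvUpdLoop heap q0).getD q 0 =
      heap.getD q 0 + (if onPath q q0 = true ∧ q ≠ 0 then 1 else 0) := by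
  induction q0 using Nat.strong_induction_on with
  | _ q0 ih =>
    intro heap q hq0 hq
    rw [pvUpdLoop]
    split
    · rename_i hpos
      have hlen : (heap.set q0 (heap.getD q0 0 + 1)).length = heap.length := by simp
      rw [ih ((q0 - 1) / 2) (by omega) _ q (by rw [List.length_set]; omega) (by rw [List.length_set]; exact hq)]
      rw [getD_set]
      conv_rhs => rw [onPath]
      by_cases hqq : q0 = q
      · subst hqq
        have hnp : ¬ (onPath q0 ((q0 - 1) / 2) = true) := fun h => by
          have := onPath_le h; omega
        rw [if_pos ⟨rfl, hq0⟩, if_pos rfl, if_neg (by tauto), if_pos ⟨rfl, by omega⟩]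
        ring
      · rw [if_neg (fun hc => hqq hc.1), if_neg (show ¬ q0 = 0 by omega), if_neg hqq]
    · rename_i hpos
      have hq00 : q0 = 0 := by omega
      subst hq00
      rw [onPath]
      split_ifs <;> simp_all

-- effect of a full update on one cell
theorem pvUpdate_getD (heap : List Int) (L r q : Nat) (hr : r < L)
    (hlen : heap.length = 2 * L - 1) (hq : q < heap.length) :
    (pvUpdate heap L r).getD q 0 =
      heap.getD q 0 + (if onPath q (r + L - 1) = true then 1 else 0) := by
  have hL : 0 < L := by omega
  have hlen' := pvUpdLoop_length (r + L - 1) heap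
  have hin : r + L - 1 < heap.length := by omega
  unfold pvUpdate
  simp only []
  rw [getD_set]
  by_cases hq0 : q = 0
  · subst hq0
    rw [if_pos ⟨rfl, by omega⟩]
    rw [pvUpdLoop_getD _ _ _ hin (by omega)]
    rw [if_neg (by simp), if_pos (onPath_zero _)]
    ring
  · rw [if_neg (fun hc => hq0 hc.1.symm)]
    rw [pvUpdLoop_getD _ _ _ hin (by omega)]
    by_cases hp : onPath q (r + L - 1) = true
    · rw [if_pos ⟨hp, hq0⟩, if_pos hp]
    · rw [if_neg (fun hc => hp hc.1), if_neg hp]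

-- the abstract contents of one tree cell: how many inserted ranks pass through it
def pvCnt (L : Nat) (R : List Nat) (q : Nat) : Int :=
  (R.countP (fun r => onPath q (r + L - 1)) : Int)

-- heap invariant: every cell holds the number of inserted ranks whose leaf path crosses it
def pvInv (heap : List Int) (L : Nat) (R : List Nat) : Prop :=
  heap.length = 2 * L - 1 ∧ ∀ q < 2 * L - 1, heap.getD q 0 = pvCnt L R q

theorem pvInv_init (L : Nat) : pvInv (List.replicate (2 * L - 1) 0) L [] := by
  refine ⟨by simp, fun q hq => ?_⟩
  simp [pvCnt, List.getD_eq_getElem?_getD, hq]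

theorem pvInv_update (heap : List Int) (L : Nat) (R : List Nat) (r : Nat)
    (h : pvInv heap L R) (hr : r < L) : pvInv (pvUpdate heap L r) L (R ++ [r]) := by
  obtain ⟨h1, h2⟩ := h
  have hlen : (pvUpdate heap L r).length = heap.length := by
    unfold pvUpdate
    simp [pvUpdLoop_length]
  refine ⟨by omega, fun q hq => ?_⟩
  rw [pvUpdate_getD heap L r q hr h1 (by omega), h2 q hq]
  simp only [pvCnt, List.countP_append, List.countP_cons, List.countP_nil]
  by_cases hp : onPath q (r + L - 1) = true
  · rw [if_pos hp]
    simp [hp]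
  · rw [if_neg hp]
    simp [hp]

-- splitting a count over two disjoint conditions
theorem countP_split (l : List Nat) (p q s : Nat → Bool)
    (h : ∀ x ∈ l, s x = (p x || q x) ∧ ¬(p x = true ∧ q x = true)) :
    l.countP s = l.countP p + l.countP q := by
  induction l with
  | nil => simp
  | cons a t ih =>
    simp only [List.countP_cons]
    rw [ih (fun x hx => h x (by simp [hx]))]
    have ha := h a (by simp)
    cases hpa : p a <;> cases hqa : q a <;> simp_all <;> omega

-- the segment-tree query counts the inserted ranks lying in the query window
theorem pvSum_eq (E : Nat) (heap : List Int) (R : List Nat)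
    (hInv : pvInv heap (2 ^ E) R) (hR : ∀ r ∈ R, r < 2 ^ E) :
    ∀ (e node lo hi i j : Nat),
      lo + 2 ^ E = (node + 1) * 2 ^ e →
      hi + 1 + 2 ^ E = (node + 2) * 2 ^ e →
      hi < 2 ^ E →
      pvSum heap node lo hi i j
        = (R.countP (fun r => decide (lo ≤ r ∧ i ≤ r ∧ r ≤ hi ∧ r ≤ j)) : Int) := by
  intro e
  induction e with
  | zero =>
    intro node lo hi i j h1 h2 h3
    rw [pow_zero, Nat.mul_one] at h1 h2
    have hlohi : lo = hi := by omega
    rw [pvSum]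
    split
    · rename_i hc1
      have h0 : R.countP (fun r => decide (lo ≤ r ∧ i ≤ r ∧ r ≤ hi ∧ r ≤ j)) = 0 :=
        List.countP_eq_zero.mpr (fun r hrR => by simp only [decide_eq_true_eq]; omega)
      rw [h0]
      simp
    · split
      · rename_i hc1 hc2
        have hnode : node < 2 * 2 ^ E - 1 := by omega
        rw [hInv.2 node hnode]
        unfold pvCnt
        apply congrArg
        apply List.countP_congr
        intro r hrR
        have hiff := anc_iff E 0 node lo hi r (by omega) (by omega) (hR r hrR) h3
        simp only [decide_eq_true_eq]
        rw [hiff]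
        omega
      · rename_i hc1 hc2
        exfalso
        omega
  | succ e ih =>
    intro node lo hi i j h1 h2 h3
    have hX : (node + 2) * 2 ^ (e + 1) = (node + 1) * 2 ^ (e + 1) + 2 ^ (e + 1) := by ring
    have hp2 : 2 ^ (e + 1) = 2 * 2 ^ e := by rw [pow_succ]; ring
    have hpe : 0 < 2 ^ e := Nat.pow_pos (by omega)
    rw [pvSum]
    split
    · rename_i hc1
      have h0 : R.countP (fun r => decide (lo ≤ r ∧ i ≤ r ∧ r ≤ hi ∧ r ≤ j)) = 0 :=
        List.countP_eq_zero.mpr (fun r hrR => by simp only [decide_eq_true_eq]; omega)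
      rw [h0]
      simp
    · split
      · rename_i hc1 hc2
        have hnode : node < 2 * 2 ^ E - 1 := by
          have := Nat.le_mul_of_pos_right (node + 1) (show 0 < 2 ^ (e + 1) by omega)
          omega
        rw [hInv.2 node hnode]
        unfold pvCnt
        apply congrArg
        apply List.countP_congr
        intro r hrR
        have hiff := anc_iff E (e + 1) node lo hi r h1 h2 (hR r hrR) h3
        simp only [decide_eq_true_eq]
        rw [hiff]
        omega
      · rename_i hc1 hc2
        have hlohi : lo < hi := by omega
        have hsz : hi + 1 = lo + 2 ^ (e + 1) := by omega
        have hmid : (lo + hi) / 2 = lo + 2 ^ e - 1 := by omega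
        have e1 : (2 * node + 1 + 1) * 2 ^ e = (node + 1) * 2 ^ (e + 1) := by
          rw [pow_succ]; ring
        have e2 : (2 * node + 1 + 2) * 2 ^ e = (node + 1) * 2 ^ (e + 1) + 2 ^ e := by
          rw [pow_succ]; ring
        have e3 : (2 * node + 2 + 2) * 2 ^ e = (node + 2) * 2 ^ (e + 1) := by
          rw [pow_succ]; ring
        have e4 : (2 * node + 2 + 1) * 2 ^ e = (node + 1) * 2 ^ (e + 1) + 2 ^ e := by
          rw [pow_succ]; ring
        have hL1 : lo + 2 ^ E = (2 * node + 1 + 1) * 2 ^ e := by rw [e1]; exact h1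
        have hL2 : (lo + hi) / 2 + 1 + 2 ^ E = (2 * node + 1 + 2) * 2 ^ e := by
          rw [hmid, e2]; omega
        have hR1 : (lo + hi) / 2 + 1 + 2 ^ E = (2 * node + 2 + 1) * 2 ^ e := by
          rw [hmid, e4]; omega
        have hR2 : hi + 1 + 2 ^ E = (2 * node + 2 + 2) * 2 ^ e := by rw [e3]; exact h2
        have hmle : (lo + hi) / 2 < 2 ^ E := by omega
        rw [ih (2 * node + 1) lo ((lo + hi) / 2) i j hL1 hL2 hmle]
        rw [ih (2 * node + 2) ((lo + hi) / 2 + 1) hi i j hR1 hR2 h3]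
        rw [← Nat.cast_add]
        refine congrArg _ ((countP_split R _ _ _ ?_).symm)
        intro x hx
        refine ⟨?_, ?_⟩
        · show decide _ = (decide _ || decide _)
          rw [← Bool.decide_or]
          exact decide_eq_decide.mpr (by omega)
        · simp only [decide_eq_true_eq]
          omega

-- the leaves loop reaches a power of two that is at least n
theorem pvLeaves_spec : ∀ (fuel n l : Nat), n - l ≤ fuel → 0 < l → (∃ e, l = 2 ^ e) →
    n ≤ pvLeaves n l ∧ ∃ E, pvLeaves n l = 2 ^ E := by
  intro fuel
  induction fuel with
  | zero =>
    intro n l h h0 hp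
    rw [pvLeaves]
    rw [dif_neg (by omega)]
    exact ⟨by omega, hp⟩
  | succ f ih =>
    intro n l h h0 hp
    rw [pvLeaves]
    split
    · exact ih n (l * 2)
        (by omega) (by omega)
        (by obtain ⟨e, he⟩ := hp; exact ⟨e + 1, by rw [pow_succ]; omega⟩)
    · exact ⟨by omega, hp⟩

-- the compression dict maps every list member to an index of it in the sorted list
theorem dict_of_enum (S : List Int) : ∀ (v : Int), v ∈ S →
    ∃ kN : Nat, ((PySem.List.enumerate S 0).foldl (fun d p => d.insert p.2 p.1) PySem.Dict.empty).get? v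
        = some ((kN : Nat) : Int) ∧ kN < S.length ∧ S[kN]? = some v := by
  induction S using List.reverseRecOn with
  | nil => intro v hv; simp at hv
  | append_singleton S' x ih =>
    intro v hv
    rw [PySem.List.enumerate_append, List.foldl_append]
    rw [show PySem.List.enumerate [x] (0 + (S'.length : Int)) = [(0 + (S'.length : Int), x)] from by
      rw [PySem.List.enumerate_cons, PySem.List.enumerate_nil]]
    simp only [List.foldl_cons, List.foldl_nil]
    by_cases hvx : v = x
    · subst hvx
      refine ⟨S'.length, ?_, by simp, by simp⟩
      rw [PySem.Dict.get?_insert_self]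
      simp
    · have hvS' : v ∈ S' := by
        rcases List.mem_append.mp hv with h | h
        · exact h
        · exact absurd (by simpa using h) hvx
      obtain ⟨kN, h1, h2, h3⟩ := ih v hvS'
      refine ⟨kN, ?_, by simp; omega, ?_⟩
      · rw [PySem.Dict.get?_insert_of_ne _ _ hvx]
        exact h1
      · rw [List.getElem?_append_left h2]
        exact h3

theorem compress_get (H : List Int) (v : Int) (hv : v ∈ H) :
    ∃ kN : Nat, (pvCompress H).get? v = some ((kN : Nat) : Int) ∧ kN < H.length ∧
      (PySem.List.sorted H (fun x => x) false)[kN]? = some v := by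
  have hvS : v ∈ PySem.List.sorted H (fun x => x) false := by
    rw [PySem.List.mem_sorted]; exact hv
  obtain ⟨kN, h1, h2, h3⟩ := dict_of_enum _ v hvS
  rw [PySem.List.length_sorted] at h2
  exact ⟨kN, h1, h2, h3⟩

-- the compressed rank of each member
theorem rk_spec (H : List Int) (v : Int) (hv : v ∈ H) :
    ∃ kN : Nat, ((pvCompress H).getD v 0).toNat = kN ∧ kN < H.length ∧
      (PySem.List.sorted H (fun x => x) false)[kN]? = some v := by
  obtain ⟨kN, h1, h2, h3⟩ := compress_get H v hv
  refine ⟨kN, ?_, h2, h3⟩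
  rw [PySem.Dict.getD_of_get?_eq_some _ 0 h1]
  simp

theorem rk_lt_len (H : List Int) (v : Int) (hv : v ∈ H) :
    ((pvCompress H).getD v 0).toNat < H.length := by
  obtain ⟨kN, h1, h2, _⟩ := rk_spec H v hv
  omega

theorem rk_lt (H : List Int) (a b : Int) (ha : a ∈ H) (hb : b ∈ H) (hab : a < b) :
    ((pvCompress H).getD a 0).toNat < ((pvCompress H).getD b 0).toNat := by
  obtain ⟨ka, ga, la, sa⟩ := rk_spec H a ha
  obtain ⟨kb, gb, lb, sb⟩ := rk_spec H b hb
  rw [ga, gb]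
  have hpw := PySem.List.sorted_pairwise (xs := H) (key := fun x => x)
  rw [List.pairwise_iff_getElem] at hpw
  have hlen : (PySem.List.sorted H (fun x => x) false).length = H.length :=
    PySem.List.length_sorted _ _ _
  by_contra hcon
  rcases Nat.lt_or_ge kb ka with hlt | hge
  · have := hpw kb ka (by omega) (by omega) hlt
    rw [List.getElem?_eq_getElem (by omega)] at sa sb
    simp only [Option.some_inj] at sa sb
    rw [sa, sb] at this
    omega
  · have hkk : ka = kb := by omega
    subst hkk
    rw [sa] at sb
    simp at sb
    omega

theorem rk_gt_iff (H : List Int) (a b : Int) (ha : a ∈ H) (hb : b ∈ H) :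
    (((pvCompress H).getD b 0).toNat < ((pvCompress H).getD a 0).toNat) ↔ b < a := by
  constructor
  · intro h
    rcases lt_trichotomy a b with h1 | h1 | h1
    · exact absurd (rk_lt H a b ha hb h1) (by omega)
    · subst h1; omega
    · exact h1
  · exact rk_lt H b a hb ha

-- main loops run in lockstep
theorem loops_eq (H : List Int) (k : Int) (E : Nat) (hE : H.length ≤ 2 ^ E) :
    ∀ (c i : Nat) (heap : List Int) (imp : Int), H.length - i ≤ c →
      pvInv heap (2 ^ E) ((H.take i).map (fun v => ((pvCompress H).getD v 0).toNat)) →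
      pvLoopA H k (pvCompress H) (2 ^ E) heap imp i = pvLoopB H k imp i := by
  intro c
  induction c with
  | zero =>
    intro i heap imp hc hInv
    rw [pvLoopA, pvLoopB]
    rw [if_neg (by omega), if_neg (by omega)]
  | succ c ih =>
    intro i heap imp hc hInv
    rw [pvLoopA, pvLoopB]
    by_cases hi : i < H.length
    · rw [if_pos hi, if_pos hi]
      have hx : H.getD i 0 ∈ H := by
        rw [List.getD_eq_getElem?_getD, List.getElem?_eq_getElem hi]
        exact List.getElem_mem hi
      have h1le : 1 ≤ 2 ^ E := Nat.one_le_two_pow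
      have hsum : pvSum heap 0 0 (2 ^ E - 1)
            (((pvCompress H).getD (H.getD i 0) 0).toNat + 1) H.length
          = (((H.take i).filter (fun y => decide (H.getD i 0 < y))).length : Int) := by
        rw [pvSum_eq E heap _ hInv
            (by intro r hr
                obtain ⟨v, hv, hveq⟩ := List.mem_map.mp hr
                have := rk_lt_len H v (List.mem_of_mem_take hv)
                omega)
            E 0 0 (2 ^ E - 1) (((pvCompress H).getD (H.getD i 0) 0).toNat + 1) H.length
            (by omega) (by omega) (by omega)]
        rw [← List.countP_eq_length_filter]
        apply congrArg
        rw [List.countP_map]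
        apply List.countP_congr
        intro y hy
        have hyH : y ∈ H := List.mem_of_mem_take hy
        have hry := rk_lt_len H y hyH
        have hiff := rk_gt_iff H y (H.getD i 0) hyH hx
        simp only [Function.comp_apply, decide_eq_true_eq]
        constructor
        · intro h
          rw [← hiff]
          omega
        · intro h
          rw [← hiff] at h
          omega
      simp only [hsum]
      by_cases hgt : imp + (((H.take i).filter (fun y => decide (H.getD i 0 < y))).length : Int) > k
      · rw [if_pos hgt, if_pos hgt]
      · rw [if_neg hgt, if_neg hgt]
        apply ih (i + 1) _ _ (by omega)
        have htake : H.take (i + 1) = H.take i ++ [H.getD i 0] := by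
          rw [List.take_add_one, List.getElem?_eq_getElem hi]
          rw [List.getD_eq_getElem?_getD, List.getElem?_eq_getElem hi]
          rfl
        rw [htake, List.map_append]
        exact pvInv_update heap (2 ^ E) _ _ hInv (by
          have := rk_lt_len H (H.getD i 0) hx
          omega)
    · rw [if_neg hi, if_neg hi]

-- ===== VERDICT (by name: the statement is the Claim_ definition above) =====
theorem treecut_spec : Claim_equal_treecut := by
  unfold Claim_equal_treecut
  intro H k _
  unfold Spec_treecut treecut_alt
  obtain ⟨hge, E, hE⟩ := pvLeaves_spec H.length H.length 1 (by omega) (by omega) ⟨0, by norm_num⟩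
  show pvLoopA H k (pvCompress H) (pvLeaves H.length 1)
      (List.replicate (2 * pvLeaves H.length 1 - 1) 0) 0 0 = pvLoopB H k 0 0
  rw [hE]
  exact loops_eq H k E (by omega) H.length 0 _ 0 (by omega) (pvInv_init (2 ^ E))
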